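-- pv_equiv track=rewrite | github.com/digital-asset/daml-finance | sort.py | sort_within_parentheses
-- ===== SOURCE A (Python) =====
-- from collections import deque
--
-- def sort_within_parentheses(import_line):
--     # a deque to store our parentheses
--     stack = deque()
--     fragments = []
--     sorted_import_line = import_line
--
--     for i, char in enumerate(import_line):
--         if char == '(':
--             stack.append(i)
--         elif char == ')' and stack:
--             start = stack.pop()
--             if not stack:
--                 # when we've found a matching pair of parentheses
--                 # extract the text within the parentheses
--                 in_brackets = import_line[start+1:i]
--                 # sort the import statements within the parentheses
--                 in_brackets_split = sorted([x.strip() for x in in_brackets.split(',')])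
--                 sorted_in_brackets = ', '.join(in_brackets_split)
--                 fragments.append((start, i, sorted_in_brackets))
--
--     # replace fragments in sorted_import_line
--     for start, end, fragment in reversed(fragments):
--         sorted_import_line = sorted_import_line[:start+1] + fragment + sorted_import_line[end:]
--
--     return sorted_import_line
-- ===== SOURCE B (Python) =====
-- def sort_within_parentheses(import_line):
--     # Single forward pass with a depth counter: emit chars at depth 0 directly,
--     # buffer a top-level group's raw contents, sort-and-emit when it closes,
--     # and flush an unclosed group unchanged at end of string.
--     out = []
--     buf = []
--     depth = 0
--     for ch in import_line:
--         if depth == 0: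
--             if ch == '(':
--                 depth = 1
--                 buf = []
--             else:
--                 out.append(ch)
--         elif ch == '(':
--             depth += 1
--             buf.append(ch)
--         elif ch == ')':
--             depth -= 1
--             if depth == 0:
--                 parts = sorted([x.strip() for x in ''.join(buf).split(',')])
--                 out.append('(' + ', '.join(parts) + ')')
--             else:
--                 buf.append(ch)
--         else:
--             buf.append(ch)
--     if depth > 0:
--         out.append('(' + ''.join(buf))
--     return ''.join(out)
-- ===== Notes on version B (the rewrite author's own statement) =====
-- stated objective: simpler
-- what changed: A collects (start,end) index pairs with an index stack in one pass and then splices sorted fragments back into the string by repeated slicing in a second reversed pass; B is a single forward pass with a depth counter that emits output immediately and buffers only the current top-level group.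
import Mathlib
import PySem

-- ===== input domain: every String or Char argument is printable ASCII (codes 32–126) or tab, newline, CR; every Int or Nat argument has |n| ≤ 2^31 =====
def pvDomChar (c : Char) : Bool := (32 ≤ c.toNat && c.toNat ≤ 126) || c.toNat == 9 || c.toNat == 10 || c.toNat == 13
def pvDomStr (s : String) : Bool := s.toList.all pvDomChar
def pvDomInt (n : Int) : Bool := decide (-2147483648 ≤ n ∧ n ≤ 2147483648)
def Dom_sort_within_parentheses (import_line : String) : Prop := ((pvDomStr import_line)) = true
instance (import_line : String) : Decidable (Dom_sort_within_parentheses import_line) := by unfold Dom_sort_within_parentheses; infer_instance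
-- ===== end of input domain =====

-- B replaces A's index-collecting two-phase algorithm (stack of indices + fragment list + reversed
-- slice-replacement pass) by a single forward pass with a depth counter that emits output as it goes
-- (objective: simpler).


-- ===== PORT A =====
-- shared helper: the Python expression ', '.join(sorted([x.strip() for x in inner.split(',')]))
-- which appears verbatim in both A and B
def pvSortInner (inner : List Char) : List Char :=
  PySem.Chars.join [',', ' ']
    (PySem.List.sorted ((PySem.Chars.splitOn inner [',']).map PySem.Chars.strip) (fun x => x) false)

-- one step of A's `for i, char in enumerate(import_line)` loop; `s` is the full string's chars,
-- state = (stack of indices, fragments); the deque push/pop at the right end is the list head here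
def pvAStep (s : List Char) (st : List Int × List (Int × Int × List Char)) (p : Int × Char) :
    List Int × List (Int × Int × List Char) :=
  let (stack, frags) := st
  let (i, c) := p
  if c = '(' then (i :: stack, frags)
  else if c = ')' ∧ stack ≠ [] then
    match stack with
    | [] => (stack, frags)
    | start :: rest =>
      if rest = [] then
        let inner := PySem.List.slice s (some (start + 1)) (some i)
        (rest, frags ++ [(start, i, pvSortInner inner)])
      else (rest, frags)
  else (stack, frags)

-- one step of A's replacement loop: line[:start+1] + fragment + line[end:]
def pvAReplace (acc : List Char) (f : Int × Int × List Char) : List Char :=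
  PySem.List.slice acc none (some (f.1 + 1)) ++ f.2.2 ++ PySem.List.slice acc (some f.2.1) none

def sort_within_parentheses (import_line : String) : String :=
  let cs := import_line.toList
  let res := (PySem.List.enumerate cs 0).foldl (pvAStep cs) ([], [])
  String.ofList (res.2.reverse.foldl pvAReplace cs)

-- ===== PORT B =====
-- one step of B's single forward pass, state = (output, depth, buffer of the open group);
-- depth is a Python int that B keeps ≥ 0 (decremented only when positive), hence Nat
def pvBStep (acc : List Char × Nat × List Char) (c : Char) : List Char × Nat × List Char :=
  let (out, depth, buf) := acc
  if depth = 0 then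
    if c = '(' then (out, 1, [])
    else (out ++ [c], 0, buf)
  else if c = '(' then (out, depth + 1, buf ++ [c])
  else if c = ')' then
    if depth = 1 then (out ++ '(' :: (pvSortInner buf ++ [')']), 0, [])
    else (out, depth - 1, buf ++ [')'])
  else (out, depth, buf ++ [c])

def sort_within_parentheses_alt (import_line : String) : String :=
  let r := import_line.toList.foldl pvBStep ([], 0, [])
  String.ofList (if r.2.1 ≠ 0 then r.1 ++ '(' :: r.2.2 else r.1)

-- ===== PRECONDITION & SPEC =====
def Spec_sort_within_parentheses (import_line : String) (out : String) : Prop := out = sort_within_parentheses_alt import_line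
instance (import_line : String) (out : String) : Decidable (Spec_sort_within_parentheses import_line out) := by unfold Spec_sort_within_parentheses; infer_instance

-- ===== CLAIM (what is proved, stated in full; the proofs are below) =====
def Claim_equal_sort_within_parentheses : Prop := ∀ (import_line : String), Dom_sort_within_parentheses import_line → Spec_sort_within_parentheses import_line (sort_within_parentheses import_line)

-- ===== LEMMAS AND PROOFS =====

-- scan for the ')' that brings the depth d down to 0; returns (chars before it, chars after it)
def pvFindClose : List Char → Nat → Option (List Char × List Char)
  | [], _ => none
  | c :: t, d =>
    if c = ')' then
      if d = 1 then some ([], t)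
      else (pvFindClose t (d - 1)).map (fun p => (c :: p.1, p.2))
    else if c = '(' then (pvFindClose t (d + 1)).map (fun p => (c :: p.1, p.2))
    else (pvFindClose t d).map (fun p => (c :: p.1, p.2))

theorem pvFindClose_decomp : ∀ {cs : List Char} {d : Nat} {inn rest : List Char},
    pvFindClose cs d = some (inn, rest) → cs = inn ++ ')' :: rest := by
  intro cs
  induction cs with
  | nil => intro d inn rest h; simp [pvFindClose] at h
  | cons c t ih =>
    intro d inn rest h
    by_cases hc : c = ')'
    · by_cases hd : d = 1
      · simp [pvFindClose, hc, hd] at h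
        obtain ⟨h1, h2⟩ := h
        simp [hc, ← h1, ← h2]
      · simp [pvFindClose, hc, hd] at h
        obtain ⟨p1, hfc, h1⟩ := h
        have := ih hfc
        simp [← h1, this, hc]
    · by_cases hc2 : c = '('
      · simp [pvFindClose, hc, hc2] at h
        obtain ⟨p1, hfc, h1⟩ := h
        have := ih hfc
        simp [← h1, this, hc2]
      · simp [pvFindClose, hc, hc2] at h
        obtain ⟨p1, hfc, h1⟩ := h
        have := ih hfc
        simp [← h1, this]

-- the common specification: one left-to-right pass over the characters
def pvSpecRun : List Char → List Char
  | [] => []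
  | c :: t =>
    if c = '(' then
      match h : pvFindClose t 1 with
      | some (inner, rest) => '(' :: (pvSortInner inner ++ ')' :: pvSpecRun rest)
      | none => '(' :: t
    else c :: pvSpecRun t
termination_by cs => cs.length
decreasing_by
  · have := pvFindClose_decomp h
    subst this
    simp
    omega
  · simp

-- the fragments A's first loop collects, with absolute positions (k = position of the suffix)
def pvFrags : Nat → List Char → List (Int × Int × List Char)
  | _, [] => []
  | k, c :: t =>
    if c = '(' then
      match h : pvFindClose t 1 with
      | some (inner, rest) =>
          ((k : Int), ((k + 1 + inner.length : Nat) : Int), pvSortInner inner) ::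
            pvFrags (k + 2 + inner.length) rest
      | none => []
    else pvFrags (k + 1) t
termination_by _ cs => cs.length
decreasing_by
  · have := pvFindClose_decomp h
    subst this
    simp
    omega
  · simp


-- B's finalisation (the expression after B's loop), as a named helper for the lemmas
def pvFinB (r : List Char × Nat × List Char) : List Char :=
  if r.2.1 ≠ 0 then r.1 ++ '(' :: r.2.2 else r.1

-- the two-mode invariant of B's single pass: at depth 0 the output so far is final;
-- at depth d ≥ 1 the buffered group either closes (pvFindClose) or is flushed verbatim
theorem pvB_run : ∀ (n : Nat) (cs : List Char), cs.length ≤ n →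
    (∀ out buf, pvFinB (List.foldl pvBStep (out, 0, buf) cs) = out ++ pvSpecRun cs) ∧
    (∀ (d : Nat) (out buf : List Char), 1 ≤ d →
      pvFinB (List.foldl pvBStep (out, d, buf) cs) =
        match pvFindClose cs d with
        | some (inner, rest) => out ++ '(' :: (pvSortInner (buf ++ inner) ++ ')' :: pvSpecRun rest)
        | none => out ++ '(' :: (buf ++ cs)) := by
  intro n
  induction n with
  | zero =>
    intro cs hl
    obtain rfl : cs = [] := List.length_eq_zero_iff.mp (Nat.le_zero.mp hl)
    constructor
    · intro out buf; simp [pvFinB, pvSpecRun]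
    · intro d out buf hd
      simp [pvFinB, pvFindClose, Nat.ne_of_gt hd]
  | succ m ih =>
    intro cs hl
    match cs with
    | [] =>
      constructor
      · intro out buf; simp [pvFinB, pvSpecRun]
      · intro d out buf hd
        simp [pvFinB, pvFindClose, Nat.ne_of_gt hd]
    | c :: t =>
      have ht : t.length ≤ m := by simp at hl; omega
      constructor
      · intro out buf
        by_cases hc : c = '('
        · have hg := (ih t ht).2 1 out [] (le_refl 1)
          rw [pvSpecRun]
          cases hfc : pvFindClose t 1 with
          | some p =>
            rw [hfc] at hg
            simp only [List.foldl_cons, pvBStep, if_pos rfl, if_pos hc]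
            simp [hc, hg]
          | none =>
            rw [hfc] at hg
            simp only [List.foldl_cons, pvBStep, if_pos rfl, if_pos hc]
            simp [hc, hg]
        · have htop := (ih t ht).1 (out ++ [c]) buf
          rw [pvSpecRun]
          simp only [List.foldl_cons, pvBStep, if_pos rfl, if_neg hc]
          simp [hc, htop]
      · intro d out buf hd
        have hd0 : ¬ d = 0 := by omega
        by_cases hc : c = '('
        · subst hc
          have hg := (ih t ht).2 (d + 1) out (buf ++ ['(']) (by omega)
          simp only [List.foldl_cons, pvBStep, if_neg hd0, if_pos rfl]
          rw [pvFindClose]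
          simp only [if_neg (by decide : ¬ '(' = ')'), if_pos rfl]
          cases hfc : pvFindClose t (d + 1) with
          | some p =>
            rw [hfc] at hg
            simp at hg
            simp [hg]
          | none =>
            rw [hfc] at hg
            simp at hg
            simp [hg]
        · by_cases hcr : c = ')'
          · subst hcr
            by_cases hd1 : d = 1
            · have htop := (ih t ht).1 (out ++ '(' :: (pvSortInner buf ++ [')'])) []
              subst hd1
              simp only [List.foldl_cons, pvBStep, if_neg hd0, if_neg hc, if_pos rfl]
              rw [pvFindClose]
              simp only [if_pos rfl]
              simp [htop]
            · have hg := (ih t ht).2 (d - 1) out (buf ++ [')']) (by omega)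
              simp only [List.foldl_cons, pvBStep, if_neg hd0, if_neg hc, if_pos rfl, if_neg hd1]
              rw [pvFindClose]
              simp only [if_pos rfl, if_neg hd1]
              cases hfc : pvFindClose t (d - 1) with
              | some p =>
                rw [hfc] at hg
                simp at hg
                simp [hg]
              | none =>
                rw [hfc] at hg
                simp at hg
                simp [hg]
          · have hg := (ih t ht).2 d out (buf ++ [c]) hd
            simp only [List.foldl_cons, pvBStep, if_neg hd0, if_neg hc, if_neg hcr]
            rw [pvFindClose]
            simp only [if_neg hcr, if_neg hc]
            cases hfc : pvFindClose t d with
            | some p =>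
              rw [hfc] at hg
              simp at hg
              simp [hg]
            | none =>
              rw [hfc] at hg
              simp at hg
              simp [hg]


theorem pvTake_succ {s t : List Char} {k : Nat} {c : Char} (h : List.drop k s = c :: t) :
    List.take (k + 1) s = List.take k s ++ [c] := by
  rw [List.take_add, h]
  simp

theorem pvTake_all {s : List Char} {k : Nat} (h : List.drop k s = []) : List.take k s = s := by
  apply List.take_of_length_le
  have := congrArg List.length h
  simp at this
  omega

-- the invariant of A's first loop: with an empty stack it collects pvFrags; with a nonempty
-- stack (bottom b) it either appends one fragment at the matching close and resets, or
-- (unmatched) collects nothing more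
theorem pvA_run (s : List Char) : ∀ (n : Nat) (cs : List Char) (k : Nat), cs.length ≤ n →
    List.drop k s = cs →
    (∀ fr, (((PySem.List.enumerate cs (k : Int)).foldl (pvAStep s) ([], fr))).2 = fr ++ pvFrags k cs) ∧
    (∀ (st : List Int) (b : Int) (fr : List (Int × Int × List Char)), st.getLast? = some b →
      match pvFindClose cs st.length with
      | some (inner, rest) =>
          (PySem.List.enumerate cs (k : Int)).foldl (pvAStep s) (st, fr) =
            (PySem.List.enumerate rest (((k + inner.length + 1 : Nat) : Int))).foldl (pvAStep s)
              ([], fr ++ [(b, ((k + inner.length : Nat) : Int),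
                pvSortInner (PySem.List.slice s (some (b + 1)) (some ((k + inner.length : Nat) : Int))))])
      | none => ((PySem.List.enumerate cs (k : Int)).foldl (pvAStep s) (st, fr)).2 = fr) := by
  intro n
  induction n with
  | zero =>
    intro cs k hl hdrop
    obtain rfl : cs = [] := List.length_eq_zero_iff.mp (Nat.le_zero.mp hl)
    constructor
    · intro fr; simp [PySem.List.enumerate, pvFrags]
    · intro st b fr hb
      simp [PySem.List.enumerate, pvFindClose]
  | succ m ih =>
    intro cs k hl hdrop
    match cs with
    | [] =>
      constructor
      · intro fr; simp [PySem.List.enumerate, pvFrags]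
      · intro st b fr hb
        simp [PySem.List.enumerate, pvFindClose]
    | c :: t =>
      have ht : t.length ≤ m := by simp at hl; omega
      have hdrop1 : List.drop (k + 1) s = t := by
        rw [← List.drop_drop, hdrop]; simp
      constructor
      · -- empty-stack mode
        intro fr
        rw [PySem.List.enumerate_cons, List.foldl_cons, pvFrags]
        by_cases hc : c = '('
        · subst hc
          have hgrp := (ih t (k + 1) ht hdrop1).2 [(k : Int)] (k : Int) fr rfl
          have hstep : pvAStep s ([], fr) ((k : Int), '(') = ([(k : Int)], fr) := by
            simp [pvAStep]
          rw [hstep]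
          have hcast : ((k : Int) + 1) = (((k + 1 : Nat)) : Int) := by push_cast; ring
          cases hfc : pvFindClose t 1 with
          | some p =>
            obtain ⟨inn, rest⟩ := p
            simp only [List.length_cons, List.length_nil, hfc] at hgrp
            have hdecomp := pvFindClose_decomp hfc
            -- the slice A stores is exactly `inn`
            have hslice : PySem.List.slice s (some ((k : Int) + 1))
                (some (((k + 1 + inn.length : Nat)) : Int)) = inn := by
              rw [hcast, PySem.List.slice_natCast]
              rw [hdrop1, hdecomp]
              have : k + 1 + inn.length - (k + 1) = inn.length := by omega
              rw [this]
              simp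
            have hdrop2 : List.drop (k + 2 + inn.length) s = rest := by
              have h1 : List.drop (k + 2 + inn.length) s = List.drop (inn.length + 1) t := by
                rw [← hdrop1, List.drop_drop]
                congr 1
                omega
              rw [h1, hdecomp, show inn ++ ')' :: rest = (inn ++ [')']) ++ rest by simp,
                  show inn.length + 1 = (inn ++ [')']).length by simp]
              exact List.drop_left
            have htop := (ih rest (k + 2 + inn.length) (by
              have := congrArg List.length hdecomp
              simp at this
              omega) hdrop2).1 (fr ++ [((k : Int), (((k + 1) + inn.length : Nat) : Int),
                pvSortInner inn)])
            rw [hcast, hgrp, hslice]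
            rw [show k + 1 + inn.length + 1 = k + 2 + inn.length by omega]
            rw [htop]
            simp [hfc]
          | none =>
            simp only [List.length_cons, List.length_nil, hfc] at hgrp
            rw [hcast, hgrp]
            simp [hfc]
        · have hstep : pvAStep s ([], fr) ((k : Int), c) = ([], fr) := by
            simp [pvAStep, hc]
          rw [hstep, if_neg hc]
          have hcast : ((k : Int) + 1) = (((k + 1 : Nat)) : Int) := by push_cast; ring
          rw [hcast]
          exact (ih t (k + 1) ht hdrop1).1 fr
      · -- group mode
        intro st b fr hb
        have hst : st ≠ [] := by
          intro h; rw [h] at hb; simp at hb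
        rw [PySem.List.enumerate_cons, List.foldl_cons]
        have hcast : ((k : Int) + 1) = (((k + 1 : Nat)) : Int) := by push_cast; ring
        by_cases hc : c = '('
        · subst hc
          have hb' : ((k : Int) :: st).getLast? = some b := by
            cases st with
            | nil => exact absurd rfl hst
            | cons x xs => rw [List.getLast?_cons_cons]; exact hb
          have hgrp := (ih t (k + 1) ht hdrop1).2 ((k : Int) :: st) b fr hb'
          have hstep : pvAStep s (st, fr) ((k : Int), '(') = ((k : Int) :: st, fr) := by
            simp [pvAStep]
          rw [hstep]
          have hred : pvFindClose ('(' :: t) st.length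
              = Option.map (fun p => ('(' :: p.1, p.2)) (pvFindClose t (st.length + 1)) := by
            rw [pvFindClose]; simp
          rw [hred]
          cases hfc : pvFindClose t (st.length + 1) with
          | some p =>
            obtain ⟨inn, rest⟩ := p
            simp only [List.length_cons, hfc] at hgrp
            simp only [Option.map_some, List.length_cons]
            rw [hcast, show k + (inn.length + 1) = k + 1 + inn.length from by omega]
            exact hgrp
          | none =>
            simp only [List.length_cons, hfc] at hgrp
            simp only [Option.map_none]
            rw [hcast]
            exact hgrp
        · by_cases hc2 : c = ')'
          · subst hc2
            cases st with
            | nil => exact absurd rfl hst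
            | cons start rest =>
            by_cases hr : rest = []
            · subst hr
              have hbs : start = b := by simpa using hb
              subst hbs
              have hstep : pvAStep s ([start], fr) ((k : Int), ')') =
                  ([], fr ++ [(start, (k : Int), pvSortInner (PySem.List.slice s (some (start + 1)) (some (k : Int))))]) := by
                simp [pvAStep]
              rw [hstep]
              have hred : pvFindClose (')' :: t) [start].length = some ([], t) := by
                rw [pvFindClose]; simp
              rw [hred]
              simp only [List.length_nil, Nat.add_zero]
              rw [hcast]
            · have hb' : rest.getLast? = some b := by
                cases rest with
                | nil => exact absurd rfl hr
                | cons y ys => rw [List.getLast?_cons_cons] at hb; exact hb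
              have hgrp := (ih t (k + 1) ht hdrop1).2 rest b fr hb'
              have hstep : pvAStep s (start :: rest, fr) ((k : Int), ')') = (rest, fr) := by
                simp [pvAStep, hr]
              rw [hstep]
              have hred : pvFindClose (')' :: t) (start :: rest).length
                  = Option.map (fun p => (')' :: p.1, p.2)) (pvFindClose t ((start :: rest).length - 1)) := by
                rw [pvFindClose]; simp [hr]
              rw [hred]
              simp only [List.length_cons, Nat.add_sub_cancel]
              cases hfc : pvFindClose t rest.length with
              | some p =>
                obtain ⟨inn, rest2⟩ := p
                rw [hfc] at hgrp
                simp only [Option.map_some, List.length_cons]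
                rw [hcast, show k + (inn.length + 1) = k + 1 + inn.length from by omega]
                exact hgrp
              | none =>
                rw [hfc] at hgrp
                simp only [Option.map_none]
                rw [hcast]
                exact hgrp
          · have hgrp := (ih t (k + 1) ht hdrop1).2 st b fr hb
            have hstep : pvAStep s (st, fr) ((k : Int), c) = (st, fr) := by
              simp [pvAStep, hc, hc2]
            rw [hstep]
            have hred : pvFindClose (c :: t) st.length
                = Option.map (fun p => (c :: p.1, p.2)) (pvFindClose t st.length) := by
              rw [pvFindClose]; simp [hc, hc2]
            rw [hred]
            cases hfc : pvFindClose t st.length with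
            | some p =>
              obtain ⟨inn, rest⟩ := p
              rw [hfc] at hgrp
              simp only [Option.map_some, List.length_cons]
              rw [hcast, show k + (inn.length + 1) = k + 1 + inn.length from by omega]
              exact hgrp
            | none =>
              rw [hfc] at hgrp
              simp only [Option.map_none]
              rw [hcast]
              exact hgrp

theorem pvDropAppend {α : Type} {a z : List α} {p : Nat} (h : a.length = p) :
    List.drop p (a ++ z) = z := by
  subst h
  exact List.drop_left

theorem pvApply (s : List Char) : ∀ (n : Nat) (cs : List Char) (k : Nat), cs.length ≤ n →
    List.drop k s = cs →
    (pvFrags k cs).reverse.foldl pvAReplace s = List.take k s ++ pvSpecRun cs := by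
  intro n
  induction n with
  | zero =>
    intro cs k hl hdrop
    obtain rfl : cs = [] := List.length_eq_zero_iff.mp (Nat.le_zero.mp hl)
    simp [pvFrags, pvSpecRun, pvTake_all hdrop]
  | succ m ih =>
    intro cs k hl hdrop
    match cs with
    | [] => simp [pvFrags, pvSpecRun, pvTake_all hdrop]
    | c :: t =>
      have ht : t.length ≤ m := by simp at hl; omega
      have hdrop1 : List.drop (k + 1) s = t := by rw [← List.drop_drop, hdrop]; simp
      rw [pvFrags, pvSpecRun]
      by_cases hc : c = '('
      · subst hc
        cases hfc : pvFindClose t 1 with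
        | some p =>
          obtain ⟨inn, rest⟩ := p
          simp only [hfc, reduceIte]
          have hdecomp := pvFindClose_decomp hfc
          have hlen : t.length = inn.length + 1 + rest.length := by
            rw [hdecomp]; simp; omega
          have hslen : s.length = k + 2 + inn.length + rest.length := by
            have := congrArg List.length hdrop1
            simp at this
            omega
          have hdropP : List.drop (k + 1 + inn.length) s = ')' :: rest := by
            have h1 : List.drop (k + 1 + inn.length) s = List.drop inn.length t := by
              rw [← hdrop1, List.drop_drop]
            rw [h1, hdecomp]
            exact List.drop_left
          have hdrop2 : List.drop (k + 2 + inn.length) s = rest := by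
            have h1 : List.drop (k + 2 + inn.length) s = List.drop 1 (List.drop (k + 1 + inn.length) s) := by
              rw [List.drop_drop]; congr 1; omega
            rw [h1, hdropP]; simp
          have hIH := ih rest (k + 2 + inn.length) (by omega) hdrop2
          rw [List.reverse_cons, List.foldl_append, hIH]
          simp only [List.foldl_cons, List.foldl_nil]
          rw [pvAReplace]
          simp only []
          have htakeM : List.take (k + 2 + inn.length) s
              = List.take (k + 1 + inn.length) s ++ [')'] := by
            rw [show k + 2 + inn.length = (k + 1 + inn.length) + 1 by omega]
            exact pvTake_succ hdropP
          -- the two slices of the partly rewritten string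
          have hsl1 : PySem.List.slice (List.take (k + 2 + inn.length) s ++ pvSpecRun rest)
              none (some ((k : Int) + 1)) = List.take (k + 1) s := by
            rw [show ((k : Int) + 1) = (((k + 1 : Nat)) : Int) by push_cast; ring,
                PySem.List.slice_to_natCast]
            rw [List.take_append_of_le_length (by simp; omega), List.take_take]
            congr 1
            omega
          have hsl2 : PySem.List.slice (List.take (k + 2 + inn.length) s ++ pvSpecRun rest)
              (some (((k + 1 + inn.length : Nat)) : Int)) none = ')' :: pvSpecRun rest := by
            rw [PySem.List.slice_from_natCast, htakeM, List.append_assoc]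
            exact pvDropAppend (by simp; omega)
          rw [hsl1, hsl2, pvTake_succ hdrop]
          simp
        | none =>
          simp only [hfc, reduceIte, List.reverse_nil, List.foldl_nil]
          nth_rewrite 1 [← List.take_append_drop k s]
          rw [hdrop]
      · rw [if_neg hc, if_neg hc]
        rw [ih t (k + 1) ht hdrop1, pvTake_succ hdrop]
        simp

-- ===== VERDICT (by name: the statement is the Claim_ definition above) =====
theorem sort_within_parentheses_spec : Claim_equal_sort_within_parentheses := by
  intro s hdom
  unfold Spec_sort_within_parentheses
  show String.ofList (((PySem.List.enumerate s.toList 0).foldl (pvAStep s.toList) ([], [])).2.reverse.foldl pvAReplace s.toList)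
      = String.ofList (pvFinB (s.toList.foldl pvBStep ([], 0, [])))
  have hA := (pvA_run s.toList s.toList.length s.toList 0 le_rfl (by simp)).1 []
  have hB := (pvB_run s.toList.length s.toList le_rfl).1 [] []
  have hAp := pvApply s.toList s.toList.length s.toList 0 le_rfl (by simp)
  simp only [Nat.cast_zero] at hA
  rw [hB, hA]
  simp only [List.nil_append]
  rw [hAp]
  simp
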